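-- pv_equiv track=rewrite | github.com/kuri-yu/Atcoder_python | MICS4F/k11.py | calculate_payments
-- ===== SOURCE A (Python) =====
-- def knapsack(bids, m):
--     """
--     動的計画法を用いてナップサック問題を解く関数
--     bids: 入札額のリスト
--     m: 出品数
--
--     戻り値: 最大の入札額の総和とそれに対応する割当て
--     """
--     n = len(bids)
--     # V[k][l]は、最初のk人の入札者とl個の財に対する最大入札額の総和を表す
--     V = [[0 for _ in range(m + 1)] for _ in range(n + 1)]
--
--     # 動的計画法による表の計算
--     for k in range(1, n + 1):
--         for l in range(1, m + 1):
--             V[k][l] = V[k - 1][l]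
--             for z in range(1, l + 1):
--                 V[k][l] = max(V[k][l], V[k - 1][l - z] + bids[k - 1] * z)
--
--     # 割当ての復元
--     allocation = [0] * n
--     remaining = m
--     for k in range(n, 0, -1):
--         if V[k][remaining] != V[k - 1][remaining]:
--             # 入札者kに財が割り当てられている場合
--             for z in range(1, remaining + 1):
--                 if V[k][remaining] == V[k - 1][remaining - z] + bids[k - 1] * z:
--                     allocation[k - 1] = z
--                     remaining -= z
--                     break
--
--     return V[n][m], allocation
--
-- def calculate_payments(bids, m, allocation):
--     """
--     VCGメカニズムによる支払い額を計算する関数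
--     bids: 入札額のリスト
--     m: 出品数
--     allocation: 全員が参加した場合の割当て
--
--     戻り値: 各買い手の支払い額のリスト
--     """
--     n = len(bids)
--     payments = [0] * n
--
--     for j in range(n):
--         # 買い手jを除いた場合のナップサック問題の解を求める
--         total_value_without_j, allocation_without_j = knapsack(bids[:j] + bids[j + 1:], m)
--
--         # 買い手jの支払い額を計算
--         payment_j = total_value_without_j
--         for i in range(n):
--             if i != j:
--                 payment_j -= bids[i] * allocation[i]
--         payments[j] = payment_j
--
--     return payments
-- ===== SOURCE B (Python) =====
-- def calculate_payments(bids, m, allocation):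
--     # Each removed-bidder knapsack has linear values, so its optimum is just
--     # m * max(0, best remaining bid): use prefix/suffix maxima instead of DP tables.
--     n = len(bids)
--     pre = [0] * (n + 1)          # pre[j] = max(0, max(bids[:j]))
--     for i in range(n):
--         pre[i + 1] = max(pre[i], bids[i])
--     suf = [0] * (n + 1)          # suf[j] = max(0, max(bids[j:]))
--     for i in range(n - 1, -1, -1):
--         suf[i] = max(suf[i + 1], bids[i])
--     total = sum(b * a for b, a in zip(bids, allocation))
--     return [m * max(pre[j], suf[j + 1]) - (total - bids[j] * allocation[j])
--             for j in range(n)]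
-- ===== Notes on version B (the rewrite author's own statement) =====
-- stated objective: faster
-- what changed: Replaces the O(n*m^2) DP knapsack solved once per bidder by the closed form 'optimal value = m * max(0, best remaining bid)', computed for every bidder at once via prefix/suffix maxima and one shared dot-product of bids and allocation.
-- outside the precondition, e.g. on calculate_payments([5], 2, []): A returns [0], B raises IndexError
import Mathlib
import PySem

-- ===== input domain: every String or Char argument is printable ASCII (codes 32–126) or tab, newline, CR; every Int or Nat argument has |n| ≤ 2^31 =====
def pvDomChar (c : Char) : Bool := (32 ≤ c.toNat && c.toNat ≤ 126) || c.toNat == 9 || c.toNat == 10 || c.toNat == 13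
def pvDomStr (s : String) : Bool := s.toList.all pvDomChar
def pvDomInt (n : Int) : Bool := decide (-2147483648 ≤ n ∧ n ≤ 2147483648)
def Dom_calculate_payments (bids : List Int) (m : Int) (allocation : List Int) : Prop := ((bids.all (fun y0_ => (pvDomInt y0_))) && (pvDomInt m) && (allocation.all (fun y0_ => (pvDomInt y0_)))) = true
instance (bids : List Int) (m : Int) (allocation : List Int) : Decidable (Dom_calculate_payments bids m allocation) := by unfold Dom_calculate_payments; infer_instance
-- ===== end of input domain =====

-- B replaces A's per-bidder O(n*m^2) DP knapsack by the closed form m*max(0, best remaining bid)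
-- via prefix/suffix maxima and one shared dot product (asymptotically faster).


-- ===== PORT A =====
-- row 0 of the DP table: all zeros ([[0]*(m+1)])
def pvRow0 (mm : Nat) : List Int := List.replicate (mm + 1) 0

-- computes row k from row k-1: V[k][l] = max over z in 1..l of V[k-1][l-z] + b*z, init V[k-1][l]
def pvBuildRow (b : Int) (prev : List Int) (mm : Nat) : List Int :=
  (List.range (mm + 1)).map (fun l =>
    (List.range' 1 l).foldl (fun acc z => max acc (prev.getD (l - z) 0 + b * (z : Int)))
      (prev.getD l 0))

-- the k-loop of the DP: builds rows 1..n one from the previous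
def pvBuildV (prev : List Int) (mm : Nat) : List Int → List (List Int)
  | [] => []
  | b :: bs =>
      let r := pvBuildRow b prev mm
      r :: pvBuildV r mm bs

-- allocation reconstruction loop (k = n .. 1, state: remaining, allocation array)
def pvRecon (V : List (List Int)) (bids : List Int) : Nat → Nat → List Int → List Int
  | 0, _, alloc => alloc
  | k + 1, rem, alloc =>
      let vk := (V.getD (k + 1) []).getD rem 0
      let vk1 := (V.getD k []).getD rem 0
      if vk ≠ vk1 then
        match (List.range' 1 rem).find?
            (fun z => vk == (V.getD k []).getD (rem - z) 0 + bids.getD k 0 * (z : Int)) with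
        | some z => pvRecon V bids k (rem - z) (alloc.set k (z : Int))
        | none => pvRecon V bids k rem alloc
      else pvRecon V bids k rem alloc

def pvKnapsack (bids : List Int) (m : Int) : Int × List Int :=
  let mm := m.toNat
  let V := pvRow0 mm :: pvBuildV (pvRow0 mm) mm bids
  let alloc := pvRecon V bids bids.length mm (List.replicate bids.length 0)
  ((V.getD bids.length []).getD mm 0, alloc)

def calculate_payments (bids : List Int) (m : Int) (allocation : List Int) : List Int :=
  let n := bids.length
  (List.range n).map (fun j =>
    let tot := (pvKnapsack (bids.take j ++ bids.drop (j + 1)) m).1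
    (List.range n).foldl
      (fun p i => if i ≠ j then p - bids.getD i 0 * allocation.getD i 0 else p) tot)

-- ===== PORT B =====
-- pre[j] = max(0, max(bids[:j]))
def pvPreMax : Int → List Int → List Int
  | cur, [] => [cur]
  | cur, b :: bs => cur :: pvPreMax (max cur b) bs

-- suf[j] = max(0, max(bids[j:]))
def pvSufMax : List Int → List Int
  | [] => [(0 : Int)]
  | b :: bs =>
      let r := pvSufMax bs
      max b (r.headD 0) :: r

def calculate_payments_alt (bids : List Int) (m : Int) (allocation : List Int) : List Int :=
  let n := bids.length
  let pre := pvPreMax 0 bids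
  let suf := pvSufMax bids
  let total := (bids.zip allocation).foldl (fun s p => s + p.1 * p.2) 0
  (List.range n).map (fun j =>
    m * max (pre.getD j 0) (suf.getD (j + 1) 0)
      - (total - bids.getD j 0 * allocation.getD j 0))

-- ===== PRECONDITION & SPEC =====
-- Pre_ excludes inputs where A raises (negative m, or allocation shorter than bids with n ≥ 2:
-- IndexError), and the single-bidder corner with allocation shorter than bids, where A returns [0]
-- without ever reading allocation but the natural B (like A for n ≥ 2) indexes allocation and raises.
def Pre_calculate_payments (bids : List Int) (m : Int) (allocation : List Int) : Prop :=
  bids = [] ∨ (0 ≤ m ∧ bids.length ≤ allocation.length)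
instance (bids : List Int) (m : Int) (allocation : List Int) : Decidable (Pre_calculate_payments bids m allocation) := by unfold Pre_calculate_payments; infer_instance

def pvWitness_calculate_payments : List Int × Int × List Int := ([3, 1, 2], 2, [2, 0, 0])

def Spec_calculate_payments (bids : List Int) (m : Int) (allocation : List Int) (out : List Int) : Prop := out = calculate_payments_alt bids m allocation
instance (bids : List Int) (m : Int) (allocation : List Int) (out : List Int) : Decidable (Spec_calculate_payments bids m allocation out) := by unfold Spec_calculate_payments; infer_instance

-- ===== CLAIM (what is proved, stated in full; the proofs are below) =====
def Claim_equal_calculate_payments : Prop := ∀ (bids : List Int) (m : Int) (allocation : List Int), Dom_calculate_payments bids m allocation → Pre_calculate_payments bids m allocation → Spec_calculate_payments bids m allocation (calculate_payments bids m allocation)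

-- ===== LEMMAS AND PROOFS =====

-- generic facts about folds of the shape  foldl (fun a z => max a (f z))
theorem pv_fold_max_ge_init {α : Type} (f : α → Int) :
    ∀ (L : List α) (init : Int), init ≤ L.foldl (fun a z => max a (f z)) init := by
  intro L
  induction L with
  | nil => intro init; simp
  | cons x xs ih =>
      intro init
      simpa using le_trans (le_max_left init (f x)) (ih (max init (f x)))

theorem pv_fold_max_ge_mem {α : Type} (f : α → Int) :
    ∀ (L : List α) (init : Int) (z : α), z ∈ L → f z ≤ L.foldl (fun a z => max a (f z)) init := by
  intro L
  induction L with
  | nil => intro init z hz; simp at hz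
  | cons x xs ih =>
      intro init z hz
      rcases List.mem_cons.mp hz with h | h
      · subst h
        simpa using le_trans (le_max_right init (f z)) (pv_fold_max_ge_init f xs _)
      · simpa using ih (max init (f x)) z h

theorem pv_fold_max_le {α : Type} (f : α → Int) :
    ∀ (L : List α) (init B : Int), init ≤ B → (∀ z ∈ L, f z ≤ B) →
      L.foldl (fun a z => max a (f z)) init ≤ B := by
  intro L
  induction L with
  | nil => intro init B h _; simpa using h
  | cons x xs ih =>
      intro init B h hall
      simp only [List.foldl_cons]
      exact ih _ B (max_le h (hall x (List.mem_cons_self))) fun z hz => hall z (List.mem_cons_of_mem _ hz)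

-- the closed-form row: rowOf M mm has entry l = l * M
def pvRowOf (M : Int) (mm : Nat) : List Int := (List.range (mm + 1)).map (fun l : Nat => (l : Int) * M)

theorem pvRowOf_getD (M : Int) (mm : Nat) (i : Nat) (h : i ≤ mm) :
    (pvRowOf M mm).getD i 0 = (i : Int) * M := by
  unfold pvRowOf
  rw [List.getD_eq_getElem?_getD, List.getElem?_map, List.getElem?_range (by omega)]
  rfl

theorem pvRow0_eq (mm : Nat) : pvRow0 mm = pvRowOf 0 mm := by
  unfold pvRow0 pvRowOf
  simp

theorem pvBuildRow_rowOf (b M : Int) (mm : Nat) :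
    pvBuildRow b (pvRowOf M mm) mm = pvRowOf (max M b) mm := by
  unfold pvBuildRow pvRowOf
  apply List.map_congr_left
  intro l hl
  have hlmm : l ≤ mm := by
    have := List.mem_range.mp hl; omega
  have hinit : (pvRowOf M mm).getD l 0 = (l : Int) * M := pvRowOf_getD M mm l hlmm
  rw [show ((List.range (mm+1)).map (fun l : Nat => (l:Int) * M) : List Int) = pvRowOf M mm from rfl,
    hinit]
  have hterm : ∀ z ∈ List.range' 1 l,
      (pvRowOf M mm).getD (l - z) 0 + b * (z : Int) = ((l : Int) - z) * M + b * z := by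
    intro z hz
    have hz' := List.mem_range'_1.mp hz
    have : (pvRowOf M mm).getD (l - z) 0 = ((l - z : Nat) : Int) * M :=
      pvRowOf_getD M mm (l - z) (by omega)
    rw [this]
    have : ((l - z : Nat) : Int) = (l : Int) - z := by omega
    rw [this]
  by_cases hb : b ≤ M
  · -- every candidate ≤ init, fold stays at l*M; max M b = M
    have hfold : (List.range' 1 l).foldl
        (fun acc z => max acc ((pvRowOf M mm).getD (l - z) 0 + b * (z : Int))) ((l:Int) * M)
        = (l : Int) * M := by
      apply le_antisymm
      · apply pv_fold_max_le _ _ _ _ le_rfl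
        intro z hz
        rw [hterm z hz]
        have hz' := List.mem_range'_1.mp hz
        have h1 : b * (z : Int) ≤ M * z := by
          apply mul_le_mul_of_nonneg_right hb; exact_mod_cast Nat.zero_le z
        nlinarith [h1]
      · exact pv_fold_max_ge_init _ _ _
    rw [hfold, max_eq_left hb]
  · rw [not_le] at hb
    rcases Nat.eq_zero_or_pos l with hl0 | hlpos
    · subst hl0; simp
    · -- fold equals l * b
      apply le_antisymm
      · apply pv_fold_max_le
        · have : (l : Int) * M ≤ (l : Int) * max M b := by
            apply mul_le_mul_of_nonneg_left (le_max_left M b); exact_mod_cast Nat.zero_le l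
          exact this
        · intro z hz
          rw [hterm z hz]
          have hz' := List.mem_range'_1.mp hz
          have hzl : (z : Int) ≤ l := by exact_mod_cast (by omega : z ≤ l)
          have hz0 : (0 : Int) ≤ z := by exact_mod_cast Nat.zero_le z
          have hMb : max M b = b := max_eq_right (le_of_lt hb)
          rw [hMb]
          nlinarith [hb]
      · have hmem : l ∈ List.range' 1 l := List.mem_range'_1.mpr ⟨hlpos, by omega⟩
        have h2 := pv_fold_max_ge_mem
          (fun z => (pvRowOf M mm).getD (l - z) 0 + b * (z : Int)) (List.range' 1 l)
          ((l : Int) * M) l hmem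
        simp only at h2
        rw [hterm l hmem] at h2
        have hMb : max M b = b := max_eq_right (le_of_lt hb)
        rw [hMb]
        calc (l:Int) * b = ((l:Int) - l) * M + b * l := by ring
        _ ≤ _ := h2

-- the DP's last row is the closed-form row for the running max
theorem pvBuildV_last (mm : Nat) :
    ∀ (bs : List Int) (M : Int),
      (pvRowOf M mm :: pvBuildV (pvRowOf M mm) mm bs).getD bs.length []
        = pvRowOf (bs.foldl max M) mm := by
  intro bs
  induction bs with
  | nil => intro M; simp [pvBuildV]
  | cons b bs ih =>
      intro M
      simp only [pvBuildV, List.length_cons, List.getD_cons_succ]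
      rw [pvBuildRow_rowOf b M mm]
      simpa [List.foldl_cons] using ih (max M b)

theorem pvKnapsack_val (bs : List Int) (m : Int) (hm : 0 ≤ m) :
    (pvKnapsack bs m).1 = m * bs.foldl max 0 := by
  unfold pvKnapsack
  simp only
  rw [pvRow0_eq, pvBuildV_last m.toNat bs 0,
    pvRowOf_getD _ _ _ le_rfl, Int.toNat_of_nonneg hm]

-- foldl max: pulling the init out
theorem pv_foldl_max_max : ∀ (L : List Int) (a b : Int),
    L.foldl max (max a b) = max a (L.foldl max b) := by
  intro L
  induction L with
  | nil => intro a b; rfl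
  | cons x xs ih =>
      intro a b
      simp only [List.foldl_cons, max_assoc]
      exact ih a (max b x)

theorem pv_foldl_max_nonneg (L : List Int) : 0 ≤ L.foldl max 0 := by
  simpa using pv_fold_max_ge_init (fun z : Int => z) L 0

theorem pv_foldl_max_append (L1 L2 : List Int) :
    (L1 ++ L2).foldl max 0 = max (L1.foldl max 0) (L2.foldl max 0) := by
  rw [List.foldl_append]
  have h : L1.foldl max 0 = max (L1.foldl max 0) 0 := (max_eq_left (pv_foldl_max_nonneg L1)).symm
  rw [h, pv_foldl_max_max]
  rw [← h]

-- pre/suf lists compute running maxima of take/drop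
theorem pvPreMax_getD : ∀ (bs : List Int) (cur : Int) (j : Nat), j ≤ bs.length →
    (pvPreMax cur bs).getD j 0 = (bs.take j).foldl max cur := by
  intro bs
  induction bs with
  | nil => intro cur j hj; simp at hj; subst hj; simp [pvPreMax]
  | cons b bs ih =>
      intro cur j hj
      cases j with
      | zero => simp [pvPreMax]
      | succ j =>
          simp only [pvPreMax, List.getD_cons_succ, List.take_succ_cons, List.foldl_cons]
          exact ih (max cur b) j (by simpa using hj)

theorem pvSufMax_getD : ∀ (bs : List Int) (j : Nat), j ≤ bs.length →
    (pvSufMax bs).getD j 0 = (bs.drop j).foldl max 0 := by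
  intro bs
  induction bs with
  | nil => intro j hj; simp at hj; subst hj; simp [pvSufMax]
  | cons b bs ih =>
      intro j hj
      cases j with
      | zero =>
          have hhead : (pvSufMax bs).headD 0 = bs.foldl max 0 := by
            have h0 := ih 0 (Nat.zero_le _)
            have hne : pvSufMax bs ≠ [] := by cases bs <;> simp [pvSufMax]
            cases h : pvSufMax bs with
            | nil => exact absurd h hne
            | cons a t => rw [h] at h0; simpa using h0
          simp only [pvSufMax, List.getD_cons_zero, List.drop_zero, List.foldl_cons]
          rw [hhead]
          rw [max_comm 0 b, pv_foldl_max_max]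
      | succ j =>
          simp only [pvSufMax, List.getD_cons_succ, List.drop_succ_cons]
          exact ih j (by simpa using hj)

-- A's skip-j subtraction fold, as total minus a filtered sum
theorem pv_skip_fold (c : Nat → Int) (j : Nat) :
    ∀ (L : List Nat) (t : Int),
      L.foldl (fun p i => if i ≠ j then p - c i else p) t
        = t - ((L.filter (fun i => i ≠ j)).map c).sum := by
  intro L
  induction L with
  | nil => intro t; simp
  | cons x xs ih =>
      intro t
      by_cases hx : x = j
      · have hf : List.filter (fun i => decide (i ≠ j)) (x :: xs)
            = List.filter (fun i => decide (i ≠ j)) xs := by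
          subst hx; simp
        rw [List.foldl_cons, if_neg (by simp [hx]), hf]
        exact ih t
      · have hf : List.filter (fun i => decide (i ≠ j)) (x :: xs)
            = x :: List.filter (fun i => decide (i ≠ j)) xs := by
          simp [hx]
        rw [List.foldl_cons, if_pos hx, hf, List.map_cons, List.sum_cons, ih]
        ring
  
theorem pv_sum_filter_ne (c : Nat → Int) :
    ∀ (n j : Nat), j < n →
      (((List.range n).filter (fun i => i ≠ j)).map c).sum = ((List.range n).map c).sum - c j := by
  intro n
  induction n with
  | zero => intro j hj; omega
  | succ n ih =>
      intro j hj
      rw [List.range_succ]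
      by_cases hjn : j = n
      · subst hjn
        have hfil : (List.range j).filter (fun i => decide (i ≠ j)) = List.range j := by
          apply List.filter_eq_self.mpr
          intro a ha
          have := List.mem_range.mp ha
          simp; omega
        have hfil2 : ([j].filter (fun i => decide (i ≠ j))) = ([] : List Nat) := by simp
        rw [List.filter_append, List.map_append, List.sum_append, hfil, hfil2,
          List.map_append, List.sum_append]
        simp
      · have hj' : j < n := by omega
        have hone : ([n].filter (fun i => decide (i ≠ j))) = [n] := by simp; omega
        rw [List.filter_append, List.map_append, List.sum_append, ih j hj', hone,
          List.map_append, List.sum_append]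
        ring
  
-- B's zip dot product equals the index-wise sum
theorem pv_fold_add :
    ∀ (L : List (Int × Int)) (a : Int),
      L.foldl (fun s p => s + p.1 * p.2) a = a + (L.map (fun p => p.1 * p.2)).sum := by
  intro L
  induction L with
  | nil => intro a; simp
  | cons x xs ih => intro a; simp [ih]; ring

theorem pv_zip_dot (bids allocation : List Int) (h : bids.length ≤ allocation.length) :
    (bids.zip allocation).foldl (fun s p => s + p.1 * p.2) 0
      = ((List.range bids.length).map
          (fun i => bids.getD i 0 * allocation.getD i 0)).sum := by
  rw [pv_fold_add, zero_add]
  congr 1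
  apply List.ext_getElem
  · simp; omega
  · intro i h1 h2
    have hi : i < bids.length := by simp at h1; omega
    have hia : i < allocation.length := by omega
    simp [List.getElem_zip, List.getD_eq_getElem?_getD, hi, hia]

-- ===== VERDICT (by name: the statement is the Claim_ definition above) =====
theorem calculate_payments_spec : Claim_equal_calculate_payments := by
  intro bids m allocation _ hpre
  unfold Spec_calculate_payments calculate_payments calculate_payments_alt
  rcases hpre with hnil | ⟨hm, hlen⟩
  · subst hnil; simp
  simp only
  apply List.map_congr_left
  intro j hj
  have hjn : j < bids.length := List.mem_range.mp hj
  -- A side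
  rw [pvKnapsack_val _ m hm]
  rw [pv_skip_fold (fun i => bids.getD i 0 * allocation.getD i 0) j,
    pv_sum_filter_ne (fun i => bids.getD i 0 * allocation.getD i 0) bids.length j hjn]
  -- B side
  rw [pv_zip_dot bids allocation hlen]
  rw [pvPreMax_getD bids 0 j (le_of_lt hjn),
    pvSufMax_getD bids (j + 1) (by omega)]
  rw [pv_foldl_max_append]
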